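-- pv_equiv track=rewrite | github.com/bssrdf/pyleet | M/MonotonicQueue.py | leftFurthestGreaterOrEqual
-- ===== SOURCE A (Python) =====
-- import bisect
--
-- def leftFurthestGreaterOrEqual(nums):
--     n = len(nums)
--     indx = [-1]*n
--     stack, stackv = [], []
--     for i in range(n):
--         if not stack or nums[stack[-1]] < nums[i]:
--             stack.append(i)
--             stackv.append(nums[i])
--         else:
--             idx = bisect.bisect_left(stackv, nums[i])
--             indx[i] = stack[idx]
--     return indx
-- ===== SOURCE B (Python) =====
-- def leftFurthestGreaterOrEqual(nums):
--     # -1 for a new prefix maximum (tracked with a running max); otherwise the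
--     # leftmost earlier index j with nums[j] >= nums[i] (that j is always itself
--     # a prefix maximum, which is why this matches the staircase/bisect answer).
--     res = []
--     best = None
--     for i, v in enumerate(nums):
--         if best is None or best < v:
--             res.append(-1)
--             best = v
--         else:
--             res.append(next(j for j in range(i) if nums[j] >= v))
--     return res
-- ===== Notes on version B (the rewrite author's own statement) =====
-- stated objective: simpler
-- what changed: Replaced the monotonic stack of prefix maxima plus bisect with a running prefix maximum (emitting -1 on each new maximum) and, for non-maxima, a direct scan for the leftmost earlier element >= nums[i] (correct because that leftmost element is always itself a prefix maximum), dropping the stack, the value list and bisect entirely.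
import Mathlib
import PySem

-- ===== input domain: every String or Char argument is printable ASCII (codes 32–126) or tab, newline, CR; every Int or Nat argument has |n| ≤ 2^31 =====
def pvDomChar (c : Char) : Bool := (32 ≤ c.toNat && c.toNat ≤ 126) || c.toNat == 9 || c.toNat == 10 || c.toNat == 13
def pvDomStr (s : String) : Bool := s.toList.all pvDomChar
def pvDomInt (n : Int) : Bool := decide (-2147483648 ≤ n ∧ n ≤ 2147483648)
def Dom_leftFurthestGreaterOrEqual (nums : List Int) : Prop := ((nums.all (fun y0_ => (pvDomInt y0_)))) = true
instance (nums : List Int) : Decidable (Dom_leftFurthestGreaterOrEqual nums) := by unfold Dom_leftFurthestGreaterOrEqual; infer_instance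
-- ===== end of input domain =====

-- B replaces A's monotonic stack + bisect with a plain per-index scan for the
-- leftmost earlier element >= nums[i] (objective: simpler; not faster).

-- ===== PORT A =====
-- bisect.bisect_left on a sorted list = number of leading elements < x
-- (exact for A: its stackv is always sorted strictly increasing)
def pvBisectLeft (a : List Int) (x : Int) : Nat :=
  (a.takeWhile (fun y => decide (y < x))).length

-- the loop body of A, on state (indx, stack, stackv)
def pvStepA (nums : List Int) (st : List Int × List Nat × List Int) (i : Nat) :
    List Int × List Nat × List Int :=
  let (indx, stack, stackv) := st
  if stack = [] ∨ nums.getD (stack.getLast?.getD 0) 0 < nums.getD i 0 then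
    (indx, stack ++ [i], stackv ++ [nums.getD i 0])
  else
    let idx := pvBisectLeft stackv (nums.getD i 0)
    (indx.set i ((stack.getD idx 0 : Nat) : Int), stack, stackv)

def leftFurthestGreaterOrEqual (nums : List Int) : List Int :=
  let n := nums.length
  let res := (List.range n).foldl (pvStepA nums)
    (List.replicate n (-1 : Int), ([] : List Nat), ([] : List Int))
  res.1

-- ===== PORT B =====
-- the loop body of B, on state (res, best); 'next(gen)' is ported as find?
-- with -1 for none (unreachable: in the else branch a qualifying j exists,
-- Python never raises StopIteration there)
def pvStepB (nums : List Int) (st : List Int × Option Int) (i : Nat) :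
    List Int × Option Int :=
  let (res, best) := st
  let v := nums.getD i 0
  match best with
  | none => (res ++ [-1], some v)
  | some b =>
    if b < v then (res ++ [-1], some v)
    else (res ++ [match (List.range i).find? (fun j => decide (nums.getD j 0 ≥ v)) with
                  | some j => (j : Int)
                  | none => -1], best)

def leftFurthestGreaterOrEqual_alt (nums : List Int) : List Int :=
  ((List.range nums.length).foldl (pvStepB nums) ([], none)).1

-- ===== PRECONDITION & SPEC =====
def Spec_leftFurthestGreaterOrEqual (nums : List Int) (out : List Int) : Prop := out = leftFurthestGreaterOrEqual_alt nums
instance (nums : List Int) (out : List Int) : Decidable (Spec_leftFurthestGreaterOrEqual nums out) := by unfold Spec_leftFurthestGreaterOrEqual; infer_instance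

-- ===== CLAIM (what is proved, stated in full; the proofs are below) =====
def Claim_equal_leftFurthestGreaterOrEqual : Prop := ∀ (nums : List Int), Dom_leftFurthestGreaterOrEqual nums → Spec_leftFurthestGreaterOrEqual nums (leftFurthestGreaterOrEqual nums)

-- ===== LEMMAS AND PROOFS =====

-- value at index j (indices used by both programs are always in range)
def pvVal (nums : List Int) (j : Nat) : Int := nums.getD j 0

-- j is a "record": strictly greater than every earlier value
def pvIsRec (nums : List Int) (j : Nat) : Bool :=
  (List.range j).all (fun m => decide (pvVal nums m < pvVal nums j))

-- the records below k, in increasing order (= A's stack after k steps)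
def pvRecs (nums : List Int) (k : Nat) : List Nat :=
  (List.range k).filter (pvIsRec nums)

-- B's per-index answer
def pvAns (nums : List Int) (i : Nat) : Int :=
  match (List.range i).find? (fun j => decide (nums.getD j 0 ≥ nums.getD i 0)) with
  | some j => (j : Int)
  | none => -1

-- indx after k steps
def pvIndx (nums : List Int) (k : Nat) : List Int :=
  (List.range nums.length).map (fun i => if i < k then pvAns nums i else -1)

lemma pvIsRec_zero (nums : List Int) : pvIsRec nums 0 = true := by
  simp [pvIsRec]

lemma pvRecs_zero (nums : List Int) : pvRecs nums 0 = [] := by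
  simp [pvRecs]

lemma mem_pvRecs {nums : List Int} {k r : Nat} :
    r ∈ pvRecs nums k ↔ r < k ∧ pvIsRec nums r = true := by
  simp [pvRecs]

lemma pvRecs_ne_nil {nums : List Int} {k : Nat} (hk : 0 < k) : pvRecs nums k ≠ [] := by
  intro h
  have : (0 : Nat) ∈ pvRecs nums k := mem_pvRecs.2 ⟨hk, pvIsRec_zero nums⟩
  simp [h] at this

lemma pvRecs_pairwise (nums : List Int) (k : Nat) :
    (pvRecs nums k).Pairwise (· < ·) :=
  (List.pairwise_lt_range (n := k)).filter _

-- every value below m is bounded by the value of some record ≤ m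
lemma pv_exists_rec (nums : List Int) :
    ∀ m : Nat, ∃ r, r ≤ m ∧ pvIsRec nums r = true ∧ pvVal nums m ≤ pvVal nums r := by
  intro m
  induction m using Nat.strong_induction_on with
  | _ m ih =>
    by_cases h : pvIsRec nums m = true
    · exact ⟨m, le_refl m, h, le_refl _⟩
    · have : ∃ m0 ∈ List.range m, ¬ (pvVal nums m0 < pvVal nums m) := by
        by_contra hc
        push Not at hc
        exact h (by simpa [pvIsRec] using hc)
      obtain ⟨m0, hm0, hge⟩ := this
      have hm0m : m0 < m := List.mem_range.1 hm0
      obtain ⟨r, hr1, hr2, hr3⟩ := ih m0 hm0m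
      exact ⟨r, le_trans hr1 (le_of_lt hm0m), hr2, le_trans (le_of_not_gt hge) hr3⟩

-- record values are monotone with index
lemma pvVal_rec_mono {nums : List Int} {r s : Nat} (hrs : r ≤ s)
    (hs : pvIsRec nums s = true) : pvVal nums r ≤ pvVal nums s := by
  rcases eq_or_lt_of_le hrs with h | h
  · subst h; exact le_refl _
  · have := (List.all_eq_true.1 hs) r (List.mem_range.2 h)
    exact le_of_lt (by simpa using this)

-- the last record below k dominates every value below k
lemma pv_last_max {nums : List Int} {k L : Nat}
    (hL : (pvRecs nums k).getLast? = some L) :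
    ∀ m < k, pvVal nums m ≤ pvVal nums L := by
  obtain ⟨l', hl'⟩ := List.getLast?_eq_some_iff.1 hL
  have hLmem : L ∈ pvRecs nums k := by rw [hl']; simp
  have hLrec : pvIsRec nums L = true := (mem_pvRecs.1 hLmem).2
  intro m hm
  obtain ⟨r, hr1, hr2, hr3⟩ := pv_exists_rec nums m
  have hrmem : r ∈ pvRecs nums k := mem_pvRecs.2 ⟨lt_of_le_of_lt hr1 hm, hr2⟩
  have hrL : r ≤ L := by
    rw [hl'] at hrmem
    rcases List.mem_append.1 hrmem with h | h
    · have hp := pvRecs_pairwise nums k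
      rw [hl'] at hp
      exact le_of_lt ((List.pairwise_append.1 hp).2.2 r h L (by simp))
    · simp at h; omega
  exact le_trans hr3 (pvVal_rec_mono hrL hLrec)

-- A's push condition on a nonempty stack ↔ k is a record
lemma pv_cond_iff {nums : List Int} {k L : Nat}
    (hL : (pvRecs nums k).getLast? = some L) :
    (pvVal nums L < pvVal nums k) ↔ pvIsRec nums k = true := by
  constructor
  · intro h
    apply List.all_eq_true.2
    intro m hm
    have := pv_last_max hL m (List.mem_range.1 hm)
    simp only [decide_eq_true_eq]
    exact lt_of_le_of_lt this h
  · intro h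
    have hLmem : L ∈ pvRecs nums k := List.mem_of_getLast? hL
    have hLk : L < k := (mem_pvRecs.1 hLmem).1
    have := (List.all_eq_true.1 h) L (List.mem_range.2 hLk)
    simpa using this

lemma pvRecs_succ_rec {nums : List Int} {k : Nat} (h : pvIsRec nums k = true) :
    pvRecs nums (k+1) = pvRecs nums k ++ [k] := by
  simp [pvRecs, List.range_succ, List.filter_append, h]

lemma pvRecs_succ_nonrec {nums : List Int} {k : Nat} (h : pvIsRec nums k = false) :
    pvRecs nums (k+1) = pvRecs nums k := by
  simp [pvRecs, List.range_succ, List.filter_append, h]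

lemma pvAns_rec {nums : List Int} {k : Nat} (h : pvIsRec nums k = true) :
    pvAns nums k = -1 := by
  have : (List.range k).find? (fun j => decide (nums.getD j 0 ≥ nums.getD k 0)) = none := by
    apply List.find?_eq_none.2
    intro j hj
    have := (List.all_eq_true.1 h) j hj
    simp only [decide_eq_true_eq] at this ⊢
    simp only [pvVal] at this
    omega
  unfold pvAns
  rw [this]

lemma pv_takeWhile_mid {p : Int → Bool} :
    ∀ (l1 : List Int) (x : Int) (l2 : List Int), (∀ y ∈ l1, p y = true) → p x = false →
    (l1 ++ x :: l2).takeWhile p = l1 := by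
  intro l1
  induction l1 with
  | nil => intro x l2 _ hx; simp [hx]
  | cons a t ih =>
    intro x l2 h hx
    have ha : p a = true := h a (by simp)
    simp [ha]
    exact ih x l2 (fun y hy => h y (by simp [hy])) hx

-- the heart of the equivalence: on a non-record index, A's stack lookup
-- returns B's leftmost earlier index with value ≥ nums[k]
lemma pv_nonrec_lookup {nums : List Int} {k : Nat} (h : pvIsRec nums k = false) :
    ((pvRecs nums k).getD
      (pvBisectLeft ((pvRecs nums k).map (pvVal nums)) (pvVal nums k)) 0 : Int)
      = pvAns nums k := by
  -- find? succeeds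
  have hex : ∃ j ∈ List.range k, (fun j => decide (nums.getD j 0 ≥ nums.getD k 0)) j = true := by
    have : ∃ m0 ∈ List.range k, ¬ (pvVal nums m0 < pvVal nums k) := by
      by_contra hc
      push Not at hc
      have ht : pvIsRec nums k = true := by simpa [pvIsRec] using hc
      rw [ht] at h
      simp at h
    obtain ⟨m0, hm0, hge⟩ := this
    exact ⟨m0, hm0, by simp only [decide_eq_true_eq]; simp only [pvVal] at hge; omega⟩
  obtain ⟨j0, hfind⟩ := List.find?_isSome.2 hex |> fun hs => Option.isSome_iff_exists.1 hs
  obtain ⟨hpj0, as, bs, hsplit, has⟩ := List.find?_eq_some_iff_append.1 hfind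
  -- as = range j0
  have hlen : as.length < k := by
    have := congrArg List.length hsplit
    simp at this; omega
  have hj0eq : j0 = as.length := by
    have h1 : (as ++ j0 :: bs)[as.length]? = some j0 := by
      rw [List.getElem?_append_right (le_refl _)]
      simp
    have h2 : (List.range k)[as.length]? = some as.length := by simp [hlen]
    rw [hsplit, h1] at h2
    exact Option.some.inj h2
  have has_range : as = List.range j0 := by
    have htake : (List.range k).take as.length = as := by
      rw [hsplit]; exact List.take_left' rfl
    rw [List.take_range, Nat.min_eq_left (le_of_lt hlen)] at htake
    rw [hj0eq]; exact htake.symm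
  have hj0k : j0 < k := by omega
  have hsmall : ∀ m < j0, pvVal nums m < pvVal nums k := by
    intro m hm
    have hmem : m ∈ as := by rw [has_range]; exact List.mem_range.2 hm
    have h3 := has m hmem
    simp only [Bool.not_eq_true', decide_eq_false_iff_not] at h3
    simp only [pvVal]
    omega
  have hgej0 : pvVal nums k ≤ pvVal nums j0 := by
    simp only [decide_eq_true_eq] at hpj0
    simp only [pvVal]; omega
  have hj0rec : pvIsRec nums j0 = true := by
    apply List.all_eq_true.2
    intro m hm
    have hmlt := List.mem_range.1 hm
    simp only [decide_eq_true_eq]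
    exact lt_of_lt_of_le (hsmall m hmlt) hgej0
  -- split recs k around j0
  have hrecs : pvRecs nums k = pvRecs nums j0 ++ j0 :: bs.filter (pvIsRec nums) := by
    have : List.range k = List.range j0 ++ j0 :: bs := by rw [← has_range]; exact hsplit
    simp [pvRecs, this, List.filter_append, hj0rec]
  -- takeWhile eats exactly the records below j0
  have hbis : pvBisectLeft ((pvRecs nums k).map (pvVal nums)) (pvVal nums k)
      = (pvRecs nums j0).length := by
    rw [hrecs]
    simp only [List.map_append, List.map_cons, pvBisectLeft]
    rw [pv_takeWhile_mid]
    · simp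
    · intro y hy
      obtain ⟨m, hm, hmy⟩ := List.mem_map.1 hy
      have := (mem_pvRecs.1 hm).1
      subst hmy
      simp only [decide_eq_true_eq]
      exact hsmall m this
    · simp only [decide_eq_false_iff_not, not_lt]
      exact hgej0
  rw [hbis, hrecs]
  have : (pvRecs nums j0 ++ j0 :: bs.filter (pvIsRec nums)).getD (pvRecs nums j0).length 0 = j0 := by
    rw [List.getD_eq_getElem?_getD, List.getElem?_append_right (le_refl _)]
    simp
  rw [this]
  unfold pvAns
  rw [hfind]

-- set on a mapped range
lemma pv_set_map_range {n k : Nat} (f : Nat → Int) (x : Int) :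
    ((List.range n).map f).set k x = (List.range n).map (fun i => if i = k then x else f i) := by
  apply List.ext_getElem
  · simp
  · intro i h1 h2
    rw [List.getElem_set]
    by_cases hik : k = i
    · subst hik; simp
    · simp [hik, Ne.symm hik, List.getElem_map]

-- the fold invariant
lemma pv_fold_inv (nums : List Int) (k : Nat) (hk : k ≤ nums.length) :
    (List.range k).foldl (pvStepA nums)
      (List.replicate nums.length (-1 : Int), ([] : List Nat), ([] : List Int))
    = (pvIndx nums k, pvRecs nums k, (pvRecs nums k).map (pvVal nums)) := by
  induction k with
  | zero =>
    simp only [List.range_zero, List.foldl_nil]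
    unfold pvIndx
    rw [pvRecs_zero]
    simp
  | succ k ih =>
    have hk' : k ≤ nums.length := le_of_lt (Nat.lt_of_succ_le hk)
    rw [List.range_succ, List.foldl_append, ih hk']
    simp only [List.foldl_cons, List.foldl_nil]
    by_cases hrec : pvIsRec nums k = true
    · -- push branch
      have hcond : (pvRecs nums k = [] ∨
          nums.getD ((pvRecs nums k).getLast?.getD 0) 0 < nums.getD k 0) := by
        rcases Nat.eq_zero_or_pos k with h0 | hpos
        · left; subst h0; exact pvRecs_zero nums
        · right
          obtain ⟨L, hL⟩ := Option.ne_none_iff_exists'.1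
            (fun h => pvRecs_ne_nil hpos (List.getLast?_eq_none_iff.1 h))
          rw [hL]
          exact (pv_cond_iff hL).2 hrec
      simp only [pvStepA]
      rw [if_pos hcond, pvRecs_succ_rec hrec]
      simp only [Prod.mk.injEq]
      refine ⟨?_, by simp [pvVal]⟩
      -- indx unchanged
      unfold pvIndx
      apply List.map_congr_left
      intro i _
      by_cases hik : i = k
      · subst hik
        simp [pvAns_rec hrec]
      · by_cases hi : i < k
        · have hi1 : i < k + 1 := by omega
          simp [hi, hi1]
        · have hi1 : ¬ i < k + 1 := by omega
          simp [hi, hi1]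
    · -- lookup branch
      have hrecF : pvIsRec nums k = false := by simpa using hrec
      have hpos : 0 < k := by
        rcases Nat.eq_zero_or_pos k with h0 | h
        · subst h0; simp [pvIsRec_zero] at hrecF
        · exact h
      obtain ⟨L, hL⟩ := Option.ne_none_iff_exists'.1
        (fun h => pvRecs_ne_nil (nums := nums) hpos (List.getLast?_eq_none_iff.1 h))
      have hcond : ¬ (pvRecs nums k = [] ∨
          nums.getD ((pvRecs nums k).getLast?.getD 0) 0 < nums.getD k 0) := by
        rintro (h1 | h2)
        · exact pvRecs_ne_nil hpos h1
        · rw [hL] at h2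
          simp only [Option.getD_some] at h2
          rw [show nums.getD L 0 = pvVal nums L from rfl,
              show nums.getD k 0 = pvVal nums k from rfl] at h2
          rw [(pv_cond_iff hL).1 h2] at hrecF
          simp at hrecF
      simp only [pvStepA]
      rw [if_neg hcond, pvRecs_succ_nonrec hrecF]
      simp only [Prod.mk.injEq]
      refine ⟨?_, by simp⟩
      -- indx.set k (lookup) = pvIndx (k+1)
      have hlook := pv_nonrec_lookup (nums := nums) hrecF
      unfold pvIndx
      rw [pv_set_map_range]
      apply List.map_congr_left
      intro i _
      by_cases hik : i = k
      · subst hik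
        simp only [if_pos (Nat.lt_succ_self i)]
        rw [show nums.getD i 0 = pvVal nums i from rfl]
        exact hlook
      · by_cases hi : i < k
        · have hi1 : i < k + 1 := by omega
          simp [hik, hi, hi1]
        · have hi1 : ¬ i < k + 1 := by omega
          simp [hik, hi, hi1]

lemma pvAns_zero (nums : List Int) : pvAns nums 0 = -1 := by
  simp [pvAns]

-- the fold invariant for B
lemma pv_foldB (nums : List Int) (k : Nat) :
    (List.range k).foldl (pvStepB nums) (([] : List Int), (none : Option Int))
      = ((List.range k).map (pvAns nums), (pvRecs nums k).getLast?.map (pvVal nums)) := by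
  induction k with
  | zero => simp [pvRecs_zero]
  | succ k ih =>
    rw [List.range_succ, List.foldl_append, ih]
    simp only [List.foldl_cons, List.foldl_nil]
    rcases hlast : (pvRecs nums k).getLast? with _ | L
    · -- empty stack of records: k = 0
      have hk0 : k = 0 := by
        by_contra h
        exact pvRecs_ne_nil (Nat.pos_of_ne_zero h) (List.getLast?_eq_none_iff.1 hlast)
      subst hk0
      simp only [Option.map_none, pvStepB]
      have h1 : pvRecs nums 1 = [0] := by
        simp [pvRecs, pvIsRec_zero]
      simp [h1, pvAns_zero, pvVal]
    · simp only [Option.map_some, pvStepB]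
      by_cases hrec : pvIsRec nums k = true
      · have hlt : pvVal nums L < pvVal nums k := (pv_cond_iff hlast).2 hrec
        rw [if_pos (by simpa [pvVal] using hlt)]
        rw [List.map_append, pvRecs_succ_rec hrec]
        simp [pvAns_rec hrec, pvVal]
      · have hrecF : pvIsRec nums k = false := by simpa using hrec
        have hnlt : ¬ pvVal nums L < pvVal nums k := fun h => by
          rw [(pv_cond_iff hlast).1 h] at hrecF; simp at hrecF
        rw [if_neg (by simpa [pvVal] using hnlt)]
        rw [List.map_append, pvRecs_succ_nonrec hrecF, hlast]
        simp [pvAns]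

lemma pv_main (nums : List Int) :
    leftFurthestGreaterOrEqual nums = leftFurthestGreaterOrEqual_alt nums := by
  show ((List.range nums.length).foldl (pvStepA nums)
    (List.replicate nums.length (-1 : Int), ([] : List Nat), ([] : List Int))).1 = _
  rw [pv_fold_inv nums nums.length (le_refl _)]
  unfold leftFurthestGreaterOrEqual_alt
  rw [pv_foldB]
  unfold pvIndx
  apply List.map_congr_left
  intro i hi
  rw [if_pos (List.mem_range.1 hi)]

-- ===== VERDICT (by name: the statement is the Claim_ definition above) =====
theorem leftFurthestGreaterOrEqual_spec : Claim_equal_leftFurthestGreaterOrEqual := by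
  intro nums _
  unfold Spec_leftFurthestGreaterOrEqual
  exact pv_main nums
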